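-- pv_equiv track=rewrite | github.com/Indu2003/Python | Product_Smallest_Pair.py | ProductSmallestPair
-- ===== SOURCE A (Python) =====
-- def ProductSmallestPair(sum,arr):
--     n=len(arr)
--     if n==None or n<2:
--         return -1
--     else:
--         smallest = float('inf')
--         second_smallest = float('inf')
--         for i in range(n):
--             if arr[i] <= smallest:
--                 second_smallest = smallest
--                 smallest = arr[i]
--             elif arr[i] <= second_smallest:
--                 second_smallest = arr[i]
--         if smallest + second_smallest <= sum:
--             return smallest * second_smallest
--         else:
--             return 0
-- ===== SOURCE B (Python) =====
-- def ProductSmallestPair(sum, arr):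
--     if len(arr) < 2:
--         return -1
--     s = sorted(arr)
--     a, b = s[0], s[1]
--     return a * b if a + b <= sum else 0
-- ===== Notes on version B (the rewrite author's own statement) =====
-- stated objective: simpler
-- what changed: Replaces the manual single-pass two-minima tracking (with float('inf') sentinels) by sorting the list and taking its first two elements.
import Mathlib
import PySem

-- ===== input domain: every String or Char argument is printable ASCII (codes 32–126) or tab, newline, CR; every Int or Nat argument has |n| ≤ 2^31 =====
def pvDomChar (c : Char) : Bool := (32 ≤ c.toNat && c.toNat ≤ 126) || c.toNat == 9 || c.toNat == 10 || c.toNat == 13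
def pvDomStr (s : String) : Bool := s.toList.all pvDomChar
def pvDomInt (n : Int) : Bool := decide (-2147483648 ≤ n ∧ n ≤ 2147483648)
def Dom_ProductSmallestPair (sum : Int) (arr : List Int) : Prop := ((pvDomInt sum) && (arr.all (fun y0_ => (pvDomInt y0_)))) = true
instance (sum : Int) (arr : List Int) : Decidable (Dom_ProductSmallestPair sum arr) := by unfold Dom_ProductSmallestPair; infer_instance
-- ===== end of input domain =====

-- B replaces A's manual single-pass tracking of two running minima (with float('inf')
-- sentinels) by sorting the list and taking its first two elements: simpler, not faster.

-- ===== PORT A =====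
-- float('inf') is modelled by `none` (it only ever compares as the largest value here;
-- for len(arr) ≥ 2 both minima are real elements by the time the loop ends).
def pvLeInf (x : Int) (o : Option Int) : Bool :=
  match o with
  | none => true          -- x ≤ inf
  | some v => decide (x ≤ v)

def pvStep (st : Option Int × Option Int) (x : Int) : Option Int × Option Int :=
  if pvLeInf x st.1 then (some x, st.1)
  else if pvLeInf x st.2 then (st.1, some x)
  else st

def ProductSmallestPair (sum : Int) (arr : List Int) : Int :=
  -- `n == None` is always False in Python; only the n < 2 guard is live
  if arr.length < 2 then -1
  else
    match arr.foldl pvStep (none, none) with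
    | (some smallest, some second_smallest) =>
        if smallest + second_smallest ≤ sum then smallest * second_smallest else 0
    | _ => -1  -- unreachable: with length ≥ 2 both minima are set

-- ===== PORT B =====
def ProductSmallestPair_alt (sum : Int) (arr : List Int) : Int :=
  if arr.length < 2 then -1
  else
    match PySem.List.sorted arr (fun x => x) false with
    | a :: b :: _ => if a + b ≤ sum then a * b else 0
    | _ => -1  -- unreachable: sorted preserves length ≥ 2

-- ===== PRECONDITION & SPEC =====
def Spec_ProductSmallestPair (sum : Int) (arr : List Int) (out : Int) : Prop := out = ProductSmallestPair_alt sum arr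
instance (sum : Int) (arr : List Int) (out : Int) : Decidable (Spec_ProductSmallestPair sum arr out) := by unfold Spec_ProductSmallestPair; infer_instance

-- ===== CLAIM (what is proved, stated in full; the proofs are below) =====
def Claim_equal_ProductSmallestPair : Prop := ∀ (sum : Int) (arr : List Int), Dom_ProductSmallestPair sum arr → Spec_ProductSmallestPair sum arr (ProductSmallestPair sum arr)

-- ===== LEMMAS AND PROOFS =====

-- the first two elements of a list, as A's (smallest, second_smallest) state
def pvFirstTwo : List Int → Option Int × Option Int
  | [] => (none, none)
  | [a] => (some a, none)
  | a :: b :: _ => (some a, some b)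

theorem pv_insertBy_pairwise (x : Int) (acc : List Int)
    (h : acc.Pairwise (· ≤ ·)) :
    (PySem.List.insertBy (fun a b => decide (a < b)) x acc).Pairwise (· ≤ ·) := by
  induction acc with
  | nil => simp [PySem.List.insertBy]
  | cons y ys ih =>
    rcases List.pairwise_cons.mp h with ⟨hy, hys⟩
    by_cases hxy : x < y
    · simp only [PySem.List.insertBy, hxy, decide_true, if_true]
      refine List.pairwise_cons.mpr ⟨?_, h⟩
      intro z hz
      rcases List.mem_cons.mp hz with rfl | hz
      · omega
      · exact le_trans (le_of_lt hxy) (hy z hz)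
    · simp only [PySem.List.insertBy, hxy, decide_false]
      refine List.pairwise_cons.mpr ⟨?_, ih hys⟩
      intro z hz
      rcases (PySem.List.mem_insertBy _ _ _ _).mp hz with rfl | hz
      · omega
      · exact hy z hz

theorem pv_step_insertBy (x : Int) (acc : List Int) (h : acc.Pairwise (· ≤ ·)) :
    pvStep (pvFirstTwo acc) x
      = pvFirstTwo (PySem.List.insertBy (fun a b => decide (a < b)) x acc) := by
  match acc with
  | [] => simp [pvStep, pvFirstTwo, pvLeInf, PySem.List.insertBy]
  | [a] =>
    by_cases hxa : x < a
    · simp [pvStep, pvFirstTwo, pvLeInf, PySem.List.insertBy, hxa, le_of_lt hxa]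
    · by_cases hax : x ≤ a
      · have : x = a := le_antisymm hax (not_lt.mp hxa)
        subst this
        simp [pvStep, pvFirstTwo, pvLeInf, PySem.List.insertBy]
      · simp [pvStep, pvFirstTwo, pvLeInf, PySem.List.insertBy, hxa, hax]
  | a :: b :: rest =>
    have hab : a ≤ b := (List.pairwise_cons.mp h).1 b (List.mem_cons_self ..)
    by_cases hxa : x < a
    · simp [pvStep, pvFirstTwo, pvLeInf, PySem.List.insertBy, hxa, le_of_lt hxa]
    · by_cases hax : x ≤ a
      · have hxeq : x = a := le_antisymm hax (not_lt.mp hxa)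
        subst hxeq
        by_cases hxb : x < b
        · simp [pvStep, pvFirstTwo, pvLeInf, PySem.List.insertBy, hxb]
        · have : x = b := le_antisymm hab (not_lt.mp hxb)
          simp [pvStep, pvFirstTwo, pvLeInf, PySem.List.insertBy, this]
      · by_cases hxb : x < b
        · simp [pvStep, pvFirstTwo, pvLeInf, PySem.List.insertBy, hxa, hax, hxb,
            le_of_lt hxb]
        · by_cases hbx : x ≤ b
          · have : x = b := le_antisymm hbx (not_lt.mp hxb)
            subst this
            simp [pvStep, pvFirstTwo, pvLeInf, PySem.List.insertBy, hxa, hax]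
          · simp [pvStep, pvFirstTwo, pvLeInf, PySem.List.insertBy, hxa, hax, hxb, hbx]

theorem pv_fold_firstTwo (l : List Int) :
    ∀ acc : List Int, acc.Pairwise (· ≤ ·) →
      l.foldl pvStep (pvFirstTwo acc)
        = pvFirstTwo (l.foldl
            (fun acc x => PySem.List.insertBy (fun a b => decide (a < b)) x acc) acc) := by
  induction l with
  | nil => intro acc _; rfl
  | cons x l ih =>
    intro acc hacc
    simp only [List.foldl_cons]
    rw [pv_step_insertBy x acc hacc]
    exact ih _ (pv_insertBy_pairwise x acc hacc)

theorem pv_state_eq_sorted (arr : List Int) :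
    arr.foldl pvStep (none, none)
      = pvFirstTwo (PySem.List.sorted arr (fun x => x) false) := by
  rw [PySem.List.sorted_eq_foldl_insertBy arr (fun x => x)]
  exact pv_fold_firstTwo arr [] (List.Pairwise.nil)

-- ===== VERDICT (by name: the statement is the Claim_ definition above) =====
theorem ProductSmallestPair_spec : Claim_equal_ProductSmallestPair := by
  intro sum arr _
  unfold Spec_ProductSmallestPair ProductSmallestPair ProductSmallestPair_alt
  by_cases hlen : arr.length < 2
  · simp [hlen]
  · simp only [hlen, if_false]
    rw [pv_state_eq_sorted]
    have hl : (PySem.List.sorted arr (fun x => x) false).length = arr.length :=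
      PySem.List.length_sorted arr (fun x => x) false
    match hs : PySem.List.sorted arr (fun x => x) false with
    | [] => exfalso; rw [hs] at hl; simp at hl; omega
    | [a] => exfalso; rw [hs] at hl; simp at hl; omega
    | a :: b :: rest => simp [pvFirstTwo]
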